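-- pv_equiv track=rewrite | github.com/hledger-flow-receipt-parsing-AI/hledger-plot | src/hledger_plot/create_plots/create_timeseries_plot.py | _sort_subcategories
-- ===== SOURCE A (Python) =====
-- def _sort_subcategories(
--     subcats: list[str],
-- ) -> tuple[list[str], dict[str, tuple[str, str | None]]]:
--     """Sort subcategories so hierarchical groups are contiguous.
--
--     Returns:
--         sorted_subcats: ordered list of subcategory names.
--         group_info: dict mapping each subcat to (legendgroup, grouptitle).
--             - Multi-child groups (2+ children): group = first segment,
--               grouptitle = first segment.  The parent itself (if present)
--               is included in the group.
--             - Single-child or flat items: group = "_flat", grouptitle = None.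
--
--     Example input::
--
--         ['ah', 'ah:kiosk', 'ah:to_go', 'aldi', 'biomarkt',
--          'decathlon:creatine', 'ekoplaza']
--
--     Sorted output order::
--
--         ['ah', 'ah:kiosk', 'ah:to_go', 'aldi', 'biomarkt',
--          'decathlon:creatine', 'ekoplaza']
--
--     group_info::
--
--         'ah'                 -> ('ah', 'ah')       # multi-child group
--         'ah:kiosk'           -> ('ah', 'ah')
--         'ah:to_go'           -> ('ah', 'ah')
--         'aldi'               -> ('_flat', None)     # flat
--         'biomarkt'           -> ('_flat', None)     # flat
--         'decathlon:creatine' -> ('_flat', None)     # single child → flat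
--         'ekoplaza'           -> ('_flat', None)     # flat
--     """
--     from collections import defaultdict
--
--     # 1. Bucket by first segment.
--     buckets: dict[str, list[str]] = defaultdict(list)
--     for sc in subcats:
--         first = sc.split(":", 1)[0]
--         buckets[first].append(sc)
--
--     # 2. Determine which buckets are "real" groups (2+ members).
--     multi_groups: set[str] = set()
--     for key, members in buckets.items():
--         if len(members) >= 2:
--             multi_groups.add(key)
--
--     # 3. Build sorted output: iterate bucket keys alphabetically.
--     #    For multi-child groups, emit parent first (if present) then children.
--     #    For flat/single-child, emit as-is.
--     sorted_subcats: list[str] = []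
--     group_info: dict[str, tuple[str, str | None]] = {}
--
--     for key in sorted(buckets.keys()):
--         members = sorted(buckets[key])
--         if key in multi_groups:
--             # Emit the bare parent first if it exists, then children.
--             parent = [m for m in members if ":" not in m]
--             children = [m for m in members if ":" in m]
--             ordered = parent + children
--             for sc in ordered:
--                 sorted_subcats.append(sc)
--                 group_info[sc] = (key, key)
--         else:
--             # Single member — treat as flat.
--             for sc in members:
--                 sorted_subcats.append(sc)
--                 group_info[sc] = ("_flat", None)
--
--     return sorted_subcats, group_info
-- ===== SOURCE B (Python) =====
-- def _sort_subcategories(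
--     subcats: list[str],
-- ) -> tuple[list[str], dict[str, tuple[str, str | None]]]:
--     """One composite-key sort plus groupby instead of bucket dict + per-bucket sorts."""
--     from itertools import groupby
--
--     keyed = sorted((sc.split(":", 1)[0], sc) for sc in subcats)
--     sorted_subcats: list[str] = []
--     group_info: dict[str, tuple[str, str | None]] = {}
--     for key, run in groupby(keyed, key=lambda pair: pair[0]):
--         members = [sc for _, sc in run]
--         tag = (key, key) if len(members) >= 2 else ("_flat", None)
--         for sc in members:
--             sorted_subcats.append(sc)
--             group_info[sc] = tag
--     return sorted_subcats, group_info
-- ===== Notes on version B (the rewrite author's own statement) =====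
-- stated objective: simpler
-- what changed: A buckets names into a dict keyed by first segment, builds a multi-group set, then sorts the keys, sorts each bucket and re-partitions it into parent/children; B does a single sort by the composite key (first_segment, full_name) and one itertools.groupby pass over the adjacent runs.
import Mathlib
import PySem

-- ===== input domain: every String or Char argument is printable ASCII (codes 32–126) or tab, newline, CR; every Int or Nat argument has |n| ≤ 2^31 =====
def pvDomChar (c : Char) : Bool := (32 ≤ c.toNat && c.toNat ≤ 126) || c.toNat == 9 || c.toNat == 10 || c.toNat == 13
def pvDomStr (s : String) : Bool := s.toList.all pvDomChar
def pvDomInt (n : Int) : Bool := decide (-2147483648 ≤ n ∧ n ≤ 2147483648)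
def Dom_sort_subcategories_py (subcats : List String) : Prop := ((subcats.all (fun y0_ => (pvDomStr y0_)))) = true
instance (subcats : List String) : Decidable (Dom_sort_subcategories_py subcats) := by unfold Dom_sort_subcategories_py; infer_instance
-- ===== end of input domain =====

-- B replaces A's bucket dict + per-bucket sorts + parent/child partition by ONE composite-key
-- sort followed by a groupby over adjacent equal first segments (objective: simpler).

-- sc.split(":", 1)[0]  (both Pythons compute the first segment with this very expression)
def pyFirstSeg (sc : String) : String :=
  ((PySem.Str.splitMax? sc ":" 1).getD [sc]).headD sc

-- ===== PORT A =====
def sort_subcategories_py (subcats : List String) : List String × (List (String × String × Option String)) :=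
  -- buckets: dict[str, list[str]], one list per first segment
  let buckets : PySem.Dict String (List String) :=
    subcats.foldl (fun d sc => d.modify (pyFirstSeg sc) [] (fun ms => ms ++ [sc])) PySem.Dict.empty
  -- multi_groups: set of keys whose bucket has >= 2 members
  let multi : PySem.Set String :=
    buckets.items.foldl (fun s kv => if 2 ≤ PySem.List.len kv.2 then PySem.Set.add s kv.1 else s)
      PySem.Set.empty
  -- main loop over sorted(buckets.keys())
  let res :=
    (PySem.List.sorted buckets.keys (fun k => k)).foldl (fun acc k =>
      let members := PySem.List.sorted (buckets.getD k []) (fun m => m)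
      if PySem.Set.contains multi k then
        let parent := members.filter (fun m => !(PySem.Str.isIn ":" m))
        let children := members.filter (fun m => PySem.Str.isIn ":" m)
        (parent ++ children).foldl
          (fun acc sc => (acc.1 ++ [sc], acc.2.insert sc (k, some k))) acc
      else
        members.foldl
          (fun acc sc => (acc.1 ++ [sc], acc.2.insert sc ("_flat", none))) acc)
      (([] : List String), (PySem.Dict.empty : PySem.Dict String (String × Option String)))
  (res.1, res.2.items)

-- ===== PORT B =====
-- itertools.groupby keyed on the first component (input comes sorted, so runs are maximal)
def pyGroupByFst (l : List (String × String)) : List (String × List String) :=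
  match l with
  | [] => []
  | (k, v) :: rest =>
    (k, v :: (rest.takeWhile (fun p => p.1 == k)).map (fun p => p.2)) ::
      pyGroupByFst (rest.dropWhile (fun p => p.1 == k))
termination_by l.length
decreasing_by
  simpa using Nat.lt_succ_of_le (List.Sublist.length_le (List.dropWhile_sublist _))

def sort_subcategories_py_alt (subcats : List String) : List String × (List (String × String × Option String)) :=
  let keyed := PySem.List.sorted2 (subcats.map (fun sc => (pyFirstSeg sc, sc)))
    (fun p => p.1) (fun p => p.2)
  let res := (pyGroupByFst keyed).foldl (fun acc g =>
      let tag : String × Option String :=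
        if 2 ≤ PySem.List.len g.2 then (g.1, some g.1) else ("_flat", none)
      g.2.foldl (fun acc sc => (acc.1 ++ [sc], acc.2.insert sc tag)) acc)
    (([] : List String), (PySem.Dict.empty : PySem.Dict String (String × Option String)))
  (res.1, res.2.items)

-- ===== PRECONDITION & SPEC =====
def Spec_sort_subcategories_py (subcats : List String) (out : List String × (List (String × String × Option String))) : Prop := out = sort_subcategories_py_alt subcats
instance (subcats : List String) (out : List String × (List (String × String × Option String))) : Decidable (Spec_sort_subcategories_py subcats out) := by unfold Spec_sort_subcategories_py; infer_instance

-- ===== CLAIM (what is proved, stated in full; the proofs are below) =====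
def Claim_equal_sort_subcategories_py : Prop := ∀ (subcats : List String), Dom_sort_subcategories_py subcats → Spec_sort_subcategories_py subcats (sort_subcategories_py subcats)

-- ===== LEMMAS AND PROOFS =====

-- the split(":", 1) worker with maxsplit exhausted copies the remainder
theorem splitOnMaxGo_zero (l cur : List Char) (acc : List (List Char)) (fuel : Nat)
    (h : 0 < fuel) :
    PySem.Chars.splitOnMax.go [':'] fuel 0 l cur acc = ((cur.reverse ++ l) :: acc).reverse := by
  cases fuel with
  | zero => omega
  | succ f => cases l <;> simp [PySem.Chars.splitOnMax.go]

-- the split(":", 1) worker cuts exactly at the first ':'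
theorem splitOnMaxGo_colon (l cur : List Char) (acc : List (List Char)) (fuel : Nat)
    (h : l.length < fuel) :
    PySem.Chars.splitOnMax.go [':'] fuel 1 l cur acc =
      acc.reverse ++ (cur.reverse ++ l.takeWhile (fun c => c != ':')) ::
        (if ':' ∈ l then [(l.dropWhile (fun c => c != ':')).tail] else []) := by
  induction l generalizing fuel cur acc with
  | nil =>
    cases fuel with
    | zero => omega
    | succ f => simp [PySem.Chars.splitOnMax.go]
  | cons c rest ih =>
    cases fuel with
    | zero => omega
    | succ f =>
      simp only [List.length_cons] at h
      by_cases hc : c = ':'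
      · subst hc
        simp [PySem.Chars.splitOnMax.go, List.isPrefixOf,
          splitOnMaxGo_zero rest [] _ f (by omega)]
      · have hpre : ([':'].isPrefixOf (c :: rest)) = false := by
          simp [List.isPrefixOf]; exact fun hh => (hc hh.symm).elim
        have hstep : PySem.Chars.splitOnMax.go [':'] (f+1) 1 (c :: rest) cur acc =
            PySem.Chars.splitOnMax.go [':'] f 1 rest (c :: cur) acc := by
          simp [PySem.Chars.splitOnMax.go, hpre]
        rw [hstep, ih (c :: cur) acc f (by omega)]
        have hc' : (c != ':') = true := by simpa using hc
        simp [hc', Ne.symm hc]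

theorem pyFirstSeg_toList (s : String) :
    (pyFirstSeg s).toList = s.toList.takeWhile (fun c => c != ':') := by
  unfold pyFirstSeg
  rw [PySem.Str.splitMax?]
  have h1 : (":" : String).toList = [':'] := by decide
  rw [h1, PySem.Chars.splitMax?]
  rw [if_neg (by simp)]
  rw [PySem.Chars.splitOnMax]
  rw [if_neg (by simp)]
  have h2 : (1 : Int).toNat = 1 := rfl
  rw [h2, splitOnMaxGo_colon _ _ _ _ (by omega)]
  by_cases hm : ':' ∈ s.toList <;> simp [hm]

theorem string_eq_of_toList {s t : String} (h : s.toList = t.toList) : s = t := by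
  have := congrArg String.ofList h
  simpa using this

theorem pyFirstSeg_of_not_colon {s : String} (h : ':' ∉ s.toList) : pyFirstSeg s = s := by
  apply string_eq_of_toList
  rw [pyFirstSeg_toList s, List.takeWhile_eq_self_iff.mpr ?_]
  intro c hc
  simp only [bne_iff_ne, ne_eq]
  exact fun e => h (e ▸ hc)

theorem lex_lt_append_cons (l t : List Char) (c : Char) : List.Lex (· < ·) l (l ++ c :: t) := by
  induction l with
  | nil => exact List.Lex.nil
  | cons a l ih => exact List.Lex.cons ih

theorem colon_split (s : String) (h : ':' ∈ s.toList) :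
    ∃ t, s.toList = s.toList.takeWhile (fun c => c != ':') ++ ':' :: t := by
  have hsplit : s.toList.takeWhile (fun c => c != ':') ++ s.toList.dropWhile (fun c => c != ':') = s.toList :=
    List.takeWhile_append_dropWhile
  cases hd : s.toList.dropWhile (fun c => c != ':') with
  | nil =>
    exfalso
    have htw : s.toList.takeWhile (fun c => c != ':') = s.toList := by
      have h2 := hsplit; rw [hd, List.append_nil] at h2; exact h2
    have := List.mem_takeWhile_imp (htw ▸ h)
    simp at this
  | cons x t =>
    have hne : s.toList.dropWhile (fun c => c != ':') ≠ [] := by simp [hd]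
    have hx := List.head_dropWhile_not (p := fun c => c != ':') (l := s.toList) hne
    have hxx : x = ':' := by
      have hh : (s.toList.dropWhile (fun c => c != ':')).head hne = x := by simp [hd]
      rw [hh] at hx; simpa using hx
    refine ⟨t, ?_⟩
    conv_lhs => rw [← hsplit, hd, hxx]

theorem pyFirstSeg_lt_of_colon {s : String} (h : ':' ∈ s.toList) : pyFirstSeg s < s := by
  rw [String.lt_iff_toList_lt, pyFirstSeg_toList s]
  obtain ⟨t, ht⟩ := colon_split s h
  have hlex : List.Lex (· < ·) (s.toList.takeWhile (fun c => c != ':')) s.toList := by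
    conv_rhs => rw [ht]
    exact lex_lt_append_cons _ _ _
  exact (List.lt_iff_lex_lt _ _).mpr hlex

theorem isIn_colon_iff (m : String) : PySem.Str.isIn ":" m = true ↔ ':' ∈ m.toList := by
  rw [PySem.Str.isIn_iff_infix]
  have h1 : (":" : String).toList = [':'] := by decide
  rw [h1]
  constructor
  · rintro ⟨p, q, hpq⟩; rw [← hpq]; simp
  · intro hm
    obtain ⟨p, q, hpq⟩ := List.append_of_mem hm
    exact ⟨p, q, by rw [hpq]; simp⟩

theorem mem_foldl_add_if {α : Type} (l : List α) (p : α → Prop) [DecidablePred p]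
    (f : α → String) (s : PySem.Set String) (x : String) :
    x ∈ l.foldl (fun s a => if p a then PySem.Set.add s (f a) else s) s ↔
      x ∈ s ∨ ∃ a ∈ l, p a ∧ x = f a := by
  induction l generalizing s with
  | nil => simp
  | cons a l ih =>
    simp only [List.foldl_cons, ih]
    by_cases hp : p a
    · simp only [hp, if_true, PySem.Set.mem_add, List.exists_mem_cons_iff]
      tauto
    · simp [hp]

theorem ofList_sublist (xs : List String) : (PySem.Set.ofList xs).Sublist xs := by
  induction xs with
  | nil => simp [PySem.Set.ofList]
  | cons x xs ih =>
    rw [PySem.Set.ofList_cons]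
    refine List.Sublist.cons₂ x ?_
    exact List.Sublist.trans (by simp [PySem.Set.discard]) ih

theorem sorted2_eq_sorted_lex (xs : List (String × String)) :
    PySem.List.sorted2 xs (fun p => p.1) (fun p => p.2) =
      PySem.List.sorted xs (fun p => toLex p) := by
  show List.foldl _ [] xs = List.foldl _ [] xs
  congr 1
  funext acc x
  congr 1
  funext a b
  show (decide (a.1 < b.1) || (!decide (b.1 < a.1) && decide (a.2 < b.2)))
      = decide (toLex a < toLex b)
  rw [Bool.eq_iff_iff]
  simp only [Bool.or_eq_true, Bool.and_eq_true, Bool.not_eq_true', decide_eq_true_eq,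
    decide_eq_false_iff_not, Prod.Lex.lt_iff, ofLex_toLex]
  constructor
  · rintro (h | ⟨h1, h2⟩)
    · exact Or.inl h
    · rcases lt_trichotomy a.1 b.1 with h3 | h3 | h3
      · exact Or.inl h3
      · exact Or.inr ⟨h3, h2⟩
      · exact absurd h3 h1
  · rintro (h | ⟨h1, h2⟩)
    · exact Or.inl h
    · exact Or.inr ⟨by rw [h1]; exact lt_irrefl _, h2⟩

theorem dropWhile_fst_gt (rest : List (String × String)) (k : String)
    (h1 : ∀ p ∈ rest, k ≤ p.1) (h2 : rest.Pairwise (fun p q => p.1 ≤ q.1)) :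
    ∀ p ∈ rest.dropWhile (fun p => p.1 == k), k < p.1 := by
  induction rest with
  | nil => simp
  | cons q rest ih =>
    rw [List.pairwise_cons] at h2
    by_cases hq : q.1 == k
    · rw [List.dropWhile_cons, if_pos hq]
      exact ih (fun p hp => h1 p (List.mem_cons_of_mem q hp)) h2.2
    · rw [List.dropWhile_cons, if_neg (by simpa using hq)]
      intro p hp
      have hqk : k < q.1 :=
        lt_of_le_of_ne (h1 q (List.mem_cons_self)) (Ne.symm (by simpa using hq))
      rcases List.mem_cons.mp hp with rfl | hp'
      · exact hqk
      · exact lt_of_lt_of_le hqk (h2.1 p hp')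

theorem ofList_filter_ne (k : String) (l : List String) :
    PySem.Set.discard (PySem.Set.ofList l) k =
      PySem.Set.ofList (l.filter (fun y => !(y == k))) := by
  induction l with
  | nil => rfl
  | cons x xs ih =>
    by_cases hx : x = k
    · subst hx
      rw [PySem.Set.ofList_cons]
      simp only [PySem.Set.discard] at ih ⊢
      rw [List.filter_cons_of_neg (by simp), List.filter_cons_of_neg (by simp),
        List.filter_filter]
      simpa using ih
    · rw [PySem.Set.ofList_cons, List.filter_cons_of_pos (by simpa using hx),
        PySem.Set.ofList_cons, ← ih]
      show List.filter _ (x :: _) = x :: _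
      rw [List.filter_cons_of_pos (by simpa using hx)]
      congr 1
      show List.filter _ (List.filter _ _) = List.filter _ (List.filter _ _)
      rw [List.filter_filter, List.filter_filter]
      congr 1
      funext y
      rw [Bool.and_comm]

-- itertools.groupby on a list sorted by first components: one run per distinct key,
-- each run collecting exactly the elements with that key
theorem pyGroupByFst_spec (l : List (String × String))
    (h : l.Pairwise (fun p q => p.1 ≤ q.1)) :
    pyGroupByFst l =
      (PySem.Set.ofList (l.map (fun p => p.1))).map
        (fun k => (k, (l.filter (fun p => p.1 == k)).map (fun p => p.2))) := by
  induction l using pyGroupByFst.induct with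
  | case1 => rw [pyGroupByFst]; rfl
  | case2 k v rest ih =>
    rw [List.pairwise_cons] at h
    have h1 : ∀ p ∈ rest, k ≤ p.1 := fun p hp => h.1 p hp
    have h2 := h.2
    set tw := rest.takeWhile (fun p => p.1 == k) with htw
    set dw := rest.dropWhile (fun p => p.1 == k) with hdw
    have hsplit : tw ++ dw = rest := List.takeWhile_append_dropWhile
    have htwk : ∀ p ∈ tw, p.1 = k := fun p hp => by
      simpa using List.mem_takeWhile_imp hp
    have hdwk : ∀ p ∈ dw, k < p.1 := dropWhile_fst_gt rest k h1 h2
    have hdwne : ∀ p ∈ dw, ¬(p.1 == k) := fun p hp => by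
      simpa using ne_of_gt (hdwk p hp)
    have hfil : rest.filter (fun p => p.1 == k) = tw := by
      rw [← hsplit, List.filter_append]
      rw [List.filter_eq_self.mpr (fun p hp => by simpa using htwk p hp),
        List.filter_eq_nil_iff.mpr (fun p hp => by simpa using hdwne p hp), List.append_nil]
    have hkeys : (PySem.Set.ofList (rest.map (fun p => p.1))).discard k =
        PySem.Set.ofList (dw.map (fun p => p.1)) := by
      rw [ofList_filter_ne, ← hsplit, List.map_append, List.filter_append]
      rw [List.filter_eq_nil_iff.mpr ?_, List.nil_append,
        List.filter_eq_self.mpr ?_]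
      · intro a ha
        obtain ⟨p, hp, rfl⟩ := List.mem_map.mp ha
        simpa using hdwne p hp
      · intro a ha hcon
        obtain ⟨p, hp, rfl⟩ := List.mem_map.mp ha
        simp only [Bool.not_eq_true', beq_eq_false_iff_ne, ne_eq] at hcon
        exact hcon (htwk p hp)
    rw [pyGroupByFst]
    simp only [List.map_cons, PySem.Set.ofList_cons, hkeys]
    rw [List.filter_cons_of_pos (by simp), hfil, List.map_cons]
    congr 1
    rw [ih (List.Pairwise.sublist (List.dropWhile_sublist _) h2)]
    apply List.map_congr_left
    intro k' hk'
    have hk'dw : k' ∈ dw.map (fun p => p.1) := (PySem.Set.mem_ofList _ _).mp hk'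
    have hk'ne : ¬(k = k') := by
      obtain ⟨p, hp, rfl⟩ := List.mem_map.mp hk'dw
      exact ne_of_lt (hdwk p hp)
    have htwnil : tw.filter (fun p => p.1 == k') = [] := by
      apply List.filter_eq_nil_iff.mpr
      intro p hp hcon
      exact hk'ne (by rw [← htwk p hp]; simpa using hcon)
    have hflt : List.filter (fun p => p.1 == k') ((k, v) :: rest) =
        List.filter (fun p => p.1 == k') dw := by
      rw [List.filter_cons_of_neg (by simpa using hk'ne), ← hsplit,
        List.filter_append, htwnil, List.nil_append]
    rw [hflt]

theorem main_core (subcats : List String) :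
    sort_subcategories_py subcats = sort_subcategories_py_alt subcats := by
  -- shared notation
  have hbuckets_eq :
      subcats.foldl (fun d sc => d.modify (pyFirstSeg sc) [] (fun ms => ms ++ [sc]))
          (PySem.Dict.empty : PySem.Dict String (List String))
        = (subcats.map (fun sc => (pyFirstSeg sc, sc))).foldl
            (fun d p => d.modify p.1 [] (fun ms => ms ++ [p.2])) PySem.Dict.empty :=
    (List.foldl_map (f := fun sc => (pyFirstSeg sc, sc))
      (g := fun (d : PySem.Dict String (List String)) p =>
        d.modify p.1 [] (fun ms => ms ++ [p.2]))).symm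
  unfold sort_subcategories_py sort_subcategories_py_alt
  rw [hbuckets_eq, sorted2_eq_sorted_lex]
  set pairs := subcats.map (fun sc => (pyFirstSeg sc, sc)) with hpairs
  set keyed := PySem.List.sorted pairs (fun p => toLex p) with hKdef
  set buckets := pairs.foldl (fun d p => d.modify p.1 [] (fun ms => ms ++ [p.2])) PySem.Dict.empty
    with hbk
  -- basic facts about keyed
  have hperm : keyed.Perm pairs := PySem.List.sorted_perm pairs (fun p => toLex p) false
  have hpw : keyed.Pairwise (fun p q => toLex p ≤ toLex q) :=
    PySem.List.sorted_pairwise pairs (fun p => toLex p)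
  have hpwfst : keyed.Pairwise (fun p q => p.1 ≤ q.1) := by
    refine hpw.imp ?_
    intro p q h
    rcases Prod.Lex.le_iff.mp h with h' | ⟨h', _⟩
    · exact le_of_lt h'
    · exact le_of_eq h'
  -- buckets facts
  have hgetD : ∀ k, buckets.getD k [] = subcats.filter (fun sc => pyFirstSeg sc == k) := by
    intro k
    rw [hbk, PySem.Dict.getD_foldl_modify_append pairs PySem.Dict.empty k]
    rw [PySem.Dict.getD_empty, List.nil_append, hpairs, List.filter_map]
    rw [List.map_map]
    show List.map (fun sc => sc) _ = _
    rw [List.map_id']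
    rfl
  have hkeys : buckets.keys = PySem.Set.ofList (subcats.map pyFirstSeg) := by
    rw [hbk, PySem.Dict.keys_foldl_modify_key pairs (fun p => p.1) []
      (fun _ p => fun ms => ms ++ [p.2]) PySem.Dict.empty]
    rw [PySem.Dict.keys_empty, PySem.Set.update_nil_left, hpairs, List.map_map]
    rfl
  have hnodupkeys : buckets.keys.Nodup := by
    rw [hkeys]; exact PySem.Set.nodup_ofList _
  have hmapfst : pairs.map (fun p => p.1) = subcats.map pyFirstSeg := by
    rw [hpairs, List.map_map]; rfl
  -- the sorted key list of A is the deduped key list of keyed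
  have hsk : PySem.List.sorted buckets.keys (fun k => k) =
      PySem.Set.ofList (keyed.map (fun p => p.1)) := by
    apply PySem.List.sorted_eq_of_perm_of_pairwise_lt
    · rw [hkeys]
      apply (List.perm_ext_iff_of_nodup (PySem.Set.nodup_ofList _) (PySem.Set.nodup_ofList _)).mpr
      intro a
      rw [PySem.Set.mem_ofList, PySem.Set.mem_ofList, (hperm.map (fun p => p.1)).mem_iff, hmapfst]
    · have h1 : (keyed.map (fun p => p.1)).Pairwise (· ≤ ·) := List.pairwise_map.mpr hpwfst
      have h2 := List.Pairwise.sublist (ofList_sublist _) h1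
      have h3 : (PySem.Set.ofList (keyed.map (fun p => p.1))).Nodup := PySem.Set.nodup_ofList _
      exact (h2.and h3).imp (fun h => lt_of_le_of_ne h.1 h.2)
  dsimp only
  set multi := List.foldl (fun s kv => if 2 ≤ PySem.List.len kv.2 then s.add kv.1 else s)
    PySem.Set.empty buckets.items with hmu
  rw [hsk, pyGroupByFst_spec keyed hpwfst, List.foldl_map]
  set K := PySem.Set.ofList (keyed.map (fun p => p.1)) with hKK
  have hmulti : ∀ k ∈ buckets.keys,
      (multi.contains k = true ↔ 2 ≤ PySem.List.len (buckets.getD k [])) := by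
    intro k hk
    simp only [hmu, PySem.Dict.items_eq_map_keys buckets hnodupkeys ([] : List String),
      List.foldl_map, PySem.Set.contains_iff]
    rw [mem_foldl_add_if buckets.keys (fun k' => 2 ≤ PySem.List.len (buckets.getD k' []))
      (fun k' => k') PySem.Set.empty k]
    constructor
    · rintro (h | ⟨a, ha, hpa, rfl⟩)
      · simp [PySem.Set.empty] at h
      · exact hpa
    · intro h2
      exact Or.inr ⟨k, hk, h2, rfl⟩
  refine congrArg (fun r : List String × PySem.Dict String (String × Option String) =>
    (r.1, r.2.items)) (PySem.List.foldl_congr_mem _ _ _ _ ?_)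
  intro acc k hk
  dsimp only
  have hkkeys : k ∈ buckets.keys := by
    rw [hKK, PySem.Set.mem_ofList] at hk
    rw [hkeys, PySem.Set.mem_ofList, ← hmapfst]
    exact (hperm.map (fun p => p.1)).mem_iff.mp hk
  rw [hgetD k]
  set bk := subcats.filter (fun sc => pyFirstSeg sc == k) with hbkk
  set segB := (keyed.filter (fun p => p.1 == k)).map (fun p => p.2) with hsegB
  set members := PySem.List.sorted bk (fun m => m) with hmem
  have hsegB_perm : segB.Perm bk := by
    have h2 := (hperm.filter (fun p => p.1 == k)).map (fun p => p.2)
    rw [hpairs, List.filter_map, List.map_map] at h2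
    rw [hsegB, hbkk]
    simpa [Function.comp_def] using h2
  have hfiltkfst : ∀ p ∈ keyed.filter (fun p => p.1 == k), p.1 = k := by
    intro p hp
    simpa using (List.mem_filter.mp hp).2
  have hsegB_pw : segB.Pairwise (fun a b => a ≤ b) := by
    rw [hsegB, List.pairwise_map]
    have hpf : (keyed.filter (fun p => p.1 == k)).Pairwise (fun p q => toLex p ≤ toLex q) :=
      List.Pairwise.sublist (List.filter_sublist) hpw
    refine (List.Pairwise.and_mem.mp hpf).imp ?_
    rintro p q ⟨hpmem, hqmem, hle⟩
    rw [Prod.Lex.le_iff] at hle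
    simp only [ofLex_toLex] at hle
    rcases hle with h' | ⟨_, h2⟩
    · exfalso
      rw [hfiltkfst p hpmem, hfiltkfst q hqmem] at h'
      exact lt_irrefl _ h'
    · exact h2
  have hbkfseg : ∀ m ∈ bk, pyFirstSeg m = k := by
    intro m hm
    simpa using (List.mem_filter.mp hm).2
  have hmembers_perm : members.Perm bk := PySem.List.sorted_perm bk (fun m => m) false
  have hmembers_pw : members.Pairwise (fun a b => a ≤ b) :=
    PySem.List.sorted_pairwise bk (fun m => m)
  have hseg_mem : segB = members :=
    PySem.List.eq_of_perm_of_pairwise_le_of_injective (fun x => x) (fun a b h => h)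
      (hsegB_perm.trans hmembers_perm.symm) hsegB_pw hmembers_pw
  have hlen : PySem.List.len segB = PySem.List.len bk := by
    simp [PySem.List.len, hsegB_perm.length_eq]
  have hcond : (multi.contains k = true) ↔ 2 ≤ PySem.List.len bk := by
    rw [hmulti k hkkeys, hgetD k]
  by_cases hc : 2 ≤ PySem.List.len bk
  · rw [if_pos (hcond.mpr hc), if_pos (by rw [hlen]; exact hc)]
    have hpar : ∀ m ∈ members.filter (fun m => !(PySem.Str.isIn ":" m)), m = k := by
      intro m hm
      obtain ⟨hmm, hni⟩ := List.mem_filter.mp hm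
      have hnc : ':' ∉ m.toList := by
        intro hcmem
        rw [(isIn_colon_iff m).mpr hcmem] at hni
        simp at hni
      rw [← pyFirstSeg_of_not_colon hnc]
      exact hbkfseg m (hmembers_perm.mem_iff.mp hmm)
    have hchild : ∀ m ∈ members.filter (fun m => PySem.Str.isIn ":" m), k < m := by
      intro m hm
      obtain ⟨hmm, hi⟩ := List.mem_filter.mp hm
      have hlt := pyFirstSeg_lt_of_colon ((isIn_colon_iff m).mp hi)
      rw [hbkfseg m (hmembers_perm.mem_iff.mp hmm)] at hlt
      exact hlt
    have hpc_perm : (members.filter (fun m => !(PySem.Str.isIn ":" m)) ++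
        members.filter (fun m => PySem.Str.isIn ":" m)).Perm members := by
      have h0 := List.filter_append_perm (fun m => !(PySem.Str.isIn ":" m)) members
      simpa [Bool.not_not] using h0
    have hpc_pw : (members.filter (fun m => !(PySem.Str.isIn ":" m)) ++
        members.filter (fun m => PySem.Str.isIn ":" m)).Pairwise (fun a b => a ≤ b) := by
      rw [List.pairwise_append]
      refine ⟨?_, List.Pairwise.sublist (List.filter_sublist) hmembers_pw, ?_⟩
      · exact List.pairwise_of_forall_mem_list
          (fun a ha b hb => by rw [hpar a ha, hpar b hb])
      · intro a ha b hb
        rw [hpar a ha]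
        exact le_of_lt (hchild b hb)
    have hpc : members.filter (fun m => !(PySem.Str.isIn ":" m)) ++
        members.filter (fun m => PySem.Str.isIn ":" m) = members :=
      PySem.List.eq_of_perm_of_pairwise_le_of_injective (fun x => x) (fun a b h => h)
        hpc_perm hpc_pw hmembers_pw
    rw [hseg_mem, hpc]
  · rw [if_neg (fun h => hc (hcond.mp h)), if_neg (fun h => hc (by rw [← hlen]; exact h)),
      hseg_mem]

-- ===== VERDICT (by name: the statement is the Claim_ definition above) =====
theorem sort_subcategories_py_spec : Claim_equal_sort_subcategories_py := by
  intro subcats _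
  unfold Spec_sort_subcategories_py
  exact main_core subcats
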